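-- pv_equiv track=rewrite | github.com/nolifer-jpg/Assignments | Own_practice/Nsat prep/balanced.py | balanced_substrings
-- ===== SOURCE A (Python) =====
-- def balanced_substrings(s):
--     count = 0
--
--     for i in range(len(s)):
--         zeros = ones = 0
--         for j in range(i, len(s)):
--             if s[j] =="0":
--                 zeros += 1
--             else:
--                 ones += 1
--             if zeros == ones:
--                 count +=1
--     return count
-- ===== SOURCE B (Python) =====
-- def balanced_substrings(s):
--     count = 0
--     p = 0
--     seen = {0: 1}
--     for ch in s:
--         p += -1 if ch == "0" else 1
--         c = seen.get(p, 0)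
--         count += c
--         seen[p] = c + 1
--     return count
-- ===== Notes on version B (the rewrite author's own statement) =====
-- stated objective: faster
-- what changed: Replaced the nested all-substrings scan by a single pass keeping a running prefix sum (-1 for '0', +1 otherwise) and a hashmap counting how often each prefix sum was seen; each balanced substring is a pair of equal prefix sums.
import Mathlib
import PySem

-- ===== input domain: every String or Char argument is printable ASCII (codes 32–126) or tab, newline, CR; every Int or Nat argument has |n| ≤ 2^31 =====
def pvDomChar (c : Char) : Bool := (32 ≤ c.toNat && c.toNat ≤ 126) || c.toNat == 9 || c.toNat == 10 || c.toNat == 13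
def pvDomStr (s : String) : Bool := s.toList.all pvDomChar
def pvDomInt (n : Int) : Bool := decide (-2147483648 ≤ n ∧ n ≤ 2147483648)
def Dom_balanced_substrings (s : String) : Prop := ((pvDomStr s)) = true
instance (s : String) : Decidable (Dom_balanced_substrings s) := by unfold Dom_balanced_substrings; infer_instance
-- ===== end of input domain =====

-- B replaces A's nested substring scan by one pass: a running prefix sum (-1 for '0', +1 otherwise)
-- with a hashmap counting equal prefix-sum pairs (objective: faster).

-- ===== PORT A =====
-- inner-loop body of A: state (zeros, ones, count), one character
def pvStepA (st : Int × Int × Int) (c : Char) : Int × Int × Int :=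
  let zo := if c = '0' then (st.1 + 1, st.2.1) else (st.1, st.2.1 + 1)
  if zo.1 = zo.2 then (zo.1, zo.2, st.2.2 + 1) else (zo.1, zo.2, st.2.2)

def balanced_substrings (s : String) : Int :=
  let cs := s.toList
  let n : Int := PySem.Str.len s
  (PySem.List.pyRange 0 n 1).foldl (fun count i =>
    ((PySem.List.pyRange i n 1).foldl
        (fun st j => pvStepA st (PySem.List.pyGetD cs j ' '))
        ((0 : Int), (0 : Int), count)).2.2) 0

-- ===== PORT B =====
-- loop body of B: state (count, p, seen), one character
def pvStepB (st : Int × Int × PySem.Dict Int Int) (ch : Char) : Int × Int × PySem.Dict Int Int :=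
  let p := st.2.1 + (if ch = '0' then (-1 : Int) else 1)
  let c := st.2.2.getD p 0
  (st.1 + c, p, st.2.2.insert p (c + 1))

def balanced_substrings_alt (s : String) : Int :=
  (s.toList.foldl pvStepB (0, 0, PySem.Dict.empty.insert 0 1)).1

-- ===== PRECONDITION & SPEC =====
def Spec_balanced_substrings (s : String) (out : Int) : Prop := out = balanced_substrings_alt s
instance (s : String) (out : Int) : Decidable (Spec_balanced_substrings s out) := by unfold Spec_balanced_substrings; infer_instance

-- ===== CLAIM (what is proved, stated in full; the proofs are below) =====
def Claim_equal_balanced_substrings : Prop := ∀ (s : String), Dom_balanced_substrings s → Spec_balanced_substrings s (balanced_substrings s)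

-- ===== LEMMAS AND PROOFS =====

-- value of a character: -1 for '0', +1 otherwise
def pvVal (c : Char) : Int := if c = '0' then -1 else 1

-- prefix sums over each nonempty prefix, starting from p
def pvSc (p : Int) : List Char → List Int
  | [] => []
  | c :: t => (p + pvVal c) :: pvSc (p + pvVal c) t

-- number of occurrences of a in a list of ints
def pvOcc (a : Int) : List Int → Int
  | [] => 0
  | b :: t => (if b = a then 1 else 0) + pvOcc a t

-- forward pair count: each element matched against the later equal ones
def pvFwd : List Int → Int
  | [] => 0
  | a :: t => pvOcc a t + pvFwd t

-- A's value as a sum over suffixes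
def pvSuf : List Char → Int
  | [] => 0
  | c :: t => pvOcc 0 (pvSc 0 (c :: t)) + pvSuf t

-- sum of dictionary counts over a list of keys
def pvSumD (d : PySem.Dict Int Int) : List Int → Int
  | [] => 0
  | a :: t => d.getD a 0 + pvSumD d t

-- ---- A side ----

theorem pv_innerA (l : List Char) : ∀ (p z o cnt : Int),
    (l.foldl pvStepA (z, o, cnt)).2.2 = cnt + pvOcc (p + z - o) (pvSc p l) := by
  induction l with
  | nil => intro p z o cnt; simp [pvSc, pvOcc]
  | cons c t ih =>
    intro p z o cnt
    rw [List.foldl_cons]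
    by_cases hc : c = '0'
    · subst hc
      have h1 : pvStepA (z, o, cnt) '0' =
          (z + 1, o, if z + 1 = o then cnt + 1 else cnt) := by
        simp [pvStepA]; split_ifs <;> simp_all
      rw [h1, ih (p + -1) (z + 1) o]
      have hv : pvVal '0' = -1 := by simp [pvVal]
      have harg : p + -1 + (z + 1) - o = p + z - o := by ring
      rw [harg]
      simp only [pvSc, hv, pvOcc]
      split_ifs <;> omega
    · have h1 : pvStepA (z, o, cnt) c =
          (z, o + 1, if z = o + 1 then cnt + 1 else cnt) := by
        simp [pvStepA, hc]; split_ifs <;> simp_all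
      rw [h1, ih (p + 1) z (o + 1)]
      have hv : pvVal c = 1 := by simp [pvVal, hc]
      have harg : p + 1 + z - (o + 1) = p + z - o := by ring
      rw [harg]
      simp only [pvSc, hv, pvOcc]
      split_ifs <;> omega

theorem pv_outerA (cs : List Char) : ∀ (k : Nat) (a : Int), 0 ≤ a →
    (cs.length - a.toNat = k) → ∀ (count : Int),
    (PySem.List.pyRange a (cs.length : Int) 1).foldl (fun count i =>
        ((PySem.List.pyRange i (cs.length : Int) 1).foldl
            (fun st j => pvStepA st (PySem.List.pyGetD cs j ' '))
            ((0 : Int), (0 : Int), count)).2.2) count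
      = count + pvSuf (cs.drop a.toNat) := by
  intro k
  induction k with
  | zero =>
    intro a ha hk count
    have hlen : (cs.length : Int) ≤ a := by omega
    rw [PySem.List.pyRange_one_eq_nil hlen]
    have hd : cs.length ≤ a.toNat := by omega
    simp [List.drop_eq_nil_of_le hd, pvSuf]
  | succ k ih =>
    intro a ha hk count
    have hlt : a < (cs.length : Int) := by omega
    have hnat : a.toNat < cs.length := by omega
    rw [PySem.List.pyRange_one_cons hlt]
    simp only [List.foldl_cons]
    rw [PySem.List.foldl_pyRange_pyGetD' cs ' ' pvStepA _ ha,
      pv_innerA (cs.drop a.toNat) 0 0 0 count]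
    rw [ih (a + 1) (by omega) (by omega)]
    have h1 : (a + 1).toNat = a.toNat + 1 := by omega
    rw [h1]
    have hdrop : cs.drop a.toNat = cs[a.toNat] :: cs.drop (a.toNat + 1) :=
      List.drop_eq_getElem_cons hnat
    have hsuf : pvSuf (cs.drop a.toNat)
        = pvOcc 0 (pvSc 0 (cs.drop a.toNat)) + pvSuf (cs.drop (a.toNat + 1)) := by
      rw [hdrop]; rfl
    rw [hsuf]
    have h0 : (0 : Int) + 0 - 0 = 0 := by ring
    rw [h0]
    ring

theorem pv_A_eq (s : String) : balanced_substrings s = pvSuf s.toList := by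
  have h := pv_outerA s.toList s.toList.length 0 (le_refl 0) rfl 0
  simpa [balanced_substrings, PySem.Str.len] using h

-- ---- B side ----

theorem pv_sumD_insert (L : List Int) (d : PySem.Dict Int Int) (q : Int) :
    pvSumD (d.insert q (d.getD q 0 + 1)) L = pvSumD d L + pvOcc q L := by
  induction L with
  | nil => simp [pvSumD, pvOcc]
  | cons a t ih =>
    simp only [pvSumD, pvOcc, ih, PySem.Dict.getD_insert]
    split_ifs with h
    · subst h; omega
    · omega

theorem pv_sumD_empty (L : List Int) : pvSumD PySem.Dict.empty L = 0 := by
  induction L with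
  | nil => rfl
  | cons a t ih => simp [pvSumD, ih, PySem.Dict.getD_empty]

theorem pv_sumD_one (L : List Int) :
    pvSumD (PySem.Dict.empty.insert 0 1) L = pvOcc 0 L := by
  have h := pv_sumD_insert L PySem.Dict.empty 0
  simpa [pv_sumD_empty, PySem.Dict.getD_empty] using h

theorem pv_loopB (l : List Char) : ∀ (cnt p : Int) (d : PySem.Dict Int Int),
    (l.foldl pvStepB (cnt, p, d)).1
      = cnt + pvSumD d (pvSc p l) + pvFwd (pvSc p l) := by
  induction l with
  | nil => intro cnt p d; simp [pvSc, pvSumD, pvFwd]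
  | cons c t ih =>
    intro cnt p d
    have hstep : pvStepB (cnt, p, d) c =
        (cnt + d.getD (p + pvVal c) 0, p + pvVal c,
          d.insert (p + pvVal c) (d.getD (p + pvVal c) 0 + 1)) := by
      simp [pvStepB, pvVal]
    rw [List.foldl_cons, hstep, ih]
    simp only [pvSc, pvSumD, pvFwd, pv_sumD_insert]
    ring

theorem pv_B_eq (s : String) :
    balanced_substrings_alt s = pvFwd (0 :: pvSc 0 s.toList) := by
  rw [balanced_substrings_alt, pv_loopB s.toList 0 0 (PySem.Dict.empty.insert 0 1)]
  have h : pvFwd (0 :: pvSc 0 s.toList)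
      = pvOcc 0 (pvSc 0 s.toList) + pvFwd (pvSc 0 s.toList) := rfl
  rw [h, pv_sumD_one]
  ring

-- ---- bridge: forward pair count over the prefix sums = A's suffix sum ----

theorem pv_occ_shift (l : List Char) : ∀ (p q : Int),
    pvOcc (p + q) (pvSc p l) = pvOcc q (pvSc 0 l) := by
  induction l with
  | nil => intro p q; simp [pvSc, pvOcc]
  | cons c t ih =>
    intro p q
    simp only [pvSc, pvOcc, zero_add]
    generalize pvVal c = v
    have e1 : pvOcc (p + q) (pvSc (p + v) t) = pvOcc (q - v) (pvSc 0 t) := by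
      have h := ih (p + v) (q - v)
      have harg : p + v + (q - v) = p + q := by ring
      rw [harg] at h
      exact h
    have e2 : pvOcc q (pvSc v t) = pvOcc (q - v) (pvSc 0 t) := by
      have h := ih v (q - v)
      have harg : v + (q - v) = q := by ring
      rw [harg] at h
      exact h
    rw [e1, e2]
    split_ifs <;> omega

theorem pv_fwd_eq_suf (l : List Char) : ∀ (p : Int),
    pvFwd (p :: pvSc p l) = pvSuf l := by
  induction l with
  | nil => intro p; simp [pvSc, pvFwd, pvSuf, pvOcc]
  | cons c t ih =>
    intro p
    have hshift := pv_occ_shift (c :: t) p 0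
    rw [add_zero] at hshift
    calc pvFwd (p :: pvSc p (c :: t))
        = pvOcc p (pvSc p (c :: t))
            + pvFwd ((p + pvVal c) :: pvSc (p + pvVal c) t) := rfl
      _ = pvOcc p (pvSc p (c :: t)) + pvSuf t := by rw [ih]
      _ = pvOcc 0 (pvSc 0 (c :: t)) + pvSuf t := by rw [hshift]
      _ = pvSuf (c :: t) := rfl

-- ===== VERDICT (by name: the statement is the Claim_ definition above) =====
theorem balanced_substrings_spec : Claim_equal_balanced_substrings := by
  intro s _
  unfold Spec_balanced_substrings
  rw [pv_A_eq, pv_B_eq, pv_fwd_eq_suf]
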